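-- pv_equiv track=rewrite | github.com/yasincayci/RLE-Image-Compression | src/rle_image_compression/scans.py | unflatten_row_major
-- ===== SOURCE A (Python) =====
-- from typing import Iterable, List, Sequence, Tuple
--
-- Matrix = List[List[int]]
--
-- def unflatten_row_major(values: Sequence[int], width: int, height: int) -> Matrix:
--     output = [[0 for _ in range(width)] for _ in range(height)]
--     idx = 0
--     for y in range(height):
--         if y % 2 == 0:
--             for x in range(width):
--                 output[y][x] = values[idx]
--                 idx += 1
--         else:
--             for x in range(width - 1, -1, -1):
--                 output[y][x] = values[idx]
--                 idx += 1
--     return output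
-- ===== SOURCE B (Python) =====
-- def unflatten_row_major(values, width, height):
--     out = []
--     for y in range(height):
--         row = list(values[y * width:(y + 1) * width])
--         if y % 2:
--             row.reverse()
--         out.append(row)
--     return out
-- ===== Notes on version B (the rewrite author's own statement) =====
-- stated objective: simpler
-- what changed: Builds the matrix row by row from slices of the flat input (reversing odd rows) instead of preallocating a zero matrix and filling it element by element with a running index and two direction-specific inner loops; Pre_ restricts to the natural domain (width >= 0) and to flat lists long enough for the grid, since A raises IndexError on short input and its empty rows for negative width are an artefact of range() on a negative count.
-- outside the precondition, e.g. on unflatten_row_major([1, 2, 3], -2, 2): A returns [[], []], B returns [[1], []]; on unflatten_row_major([1], 2, 2): A raises IndexError, B returns [[1], []]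
import Mathlib
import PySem

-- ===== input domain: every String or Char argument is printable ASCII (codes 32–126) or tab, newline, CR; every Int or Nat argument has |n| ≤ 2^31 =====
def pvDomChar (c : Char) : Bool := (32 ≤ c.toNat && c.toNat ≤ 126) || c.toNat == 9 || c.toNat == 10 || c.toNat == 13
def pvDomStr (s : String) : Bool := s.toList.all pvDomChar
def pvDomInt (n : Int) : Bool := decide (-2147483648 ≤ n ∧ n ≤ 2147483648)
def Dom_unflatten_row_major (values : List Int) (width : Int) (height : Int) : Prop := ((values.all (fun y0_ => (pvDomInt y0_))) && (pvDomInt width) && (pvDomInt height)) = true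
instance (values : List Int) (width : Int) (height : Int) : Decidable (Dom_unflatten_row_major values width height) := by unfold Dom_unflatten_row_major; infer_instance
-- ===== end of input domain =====

-- B builds the matrix row by row from slices of the flat input (odd rows reversed)
-- instead of filling a preallocated zero matrix element by element with a running index:
-- a simpler decomposition, same asymptotic cost.

-- ===== PORT A =====
-- literal transliteration: zero matrix, then a fold over rows threading (output, idx),
-- with direction-specific inner folds writing one element at a time (values[idx] → pyGetD, exact under Pre_)
def unflatten_row_major (values : List Int) (width : Int) (height : Int) : List (List Int) :=
  let output : List (List Int) :=
    (PySem.List.pyRange 0 height 1).map (fun _ => (PySem.List.pyRange 0 width 1).map (fun _ => (0 : Int)))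
  let st :=
    (PySem.List.pyRange 0 height 1).foldl
      (fun (st : List (List Int) × Int) y =>
        if PySem.Int.mod y 2 == 0 then
          (PySem.List.pyRange 0 width 1).foldl
            (fun (st2 : List (List Int) × Int) x =>
              (st2.1.modify y.toNat (fun row => row.set x.toNat (PySem.List.pyGetD values st2.2 0)), st2.2 + 1)) st
        else
          (PySem.List.pyRange (width - 1) (-1) (-1)).foldl
            (fun (st2 : List (List Int) × Int) x =>
              (st2.1.modify y.toNat (fun row => row.set x.toNat (PySem.List.pyGetD values st2.2 0)), st2.2 + 1)) st)
      (output, (0 : Int))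
  st.1

-- ===== PORT B =====
-- transliteration of Source B: slice out each row, reverse odd rows, append
def unflatten_row_major_alt (values : List Int) (width : Int) (height : Int) : List (List Int) :=
  (PySem.List.pyRange 0 height 1).foldl
    (fun (out : List (List Int)) y =>
      let row := PySem.List.slice values (some (y * width)) (some ((y + 1) * width))
      out ++ [if PySem.Int.mod y 2 == 1 then row.reverse else row])
    []

-- ===== PRECONDITION & SPEC =====
-- Pre_ restricts to the natural domain: width ≥ 0 (a negative width is not a grid; A's
-- empty rows there are an artefact of range() on a negative count) and a flat list long
-- enough for the grid (A raises IndexError on shorter input).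
def Pre_unflatten_row_major (values : List Int) (width : Int) (height : Int) : Prop :=
  0 ≤ width ∧ width * height ≤ (values.length : Int)
instance (values : List Int) (width : Int) (height : Int) : Decidable (Pre_unflatten_row_major values width height) := by unfold Pre_unflatten_row_major; infer_instance
def pvWitness_unflatten_row_major : List Int × Int × Int := ([1, 2, 3, 4, 5, 6], 3, 2)

def Spec_unflatten_row_major (values : List Int) (width : Int) (height : Int) (out : List (List Int)) : Prop := out = unflatten_row_major_alt values width height
instance (values : List Int) (width : Int) (height : Int) (out : List (List Int)) : Decidable (Spec_unflatten_row_major values width height out) := by unfold Spec_unflatten_row_major; infer_instance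

-- ===== CLAIM (what is proved, stated in full; the proofs are below) =====
def Claim_equal_unflatten_row_major : Prop := ∀ (values : List Int) (width : Int) (height : Int), Dom_unflatten_row_major values width height → Pre_unflatten_row_major values width height → Spec_unflatten_row_major values width height (unflatten_row_major values width height)

-- ===== LEMMAS AND PROOFS =====

-- the forward row A writes starting at flat index i0
def rowFwd (values : List Int) (i0 : Int) (W : Nat) : List Int :=
  (List.range W).map (fun (x : Nat) => PySem.List.pyGetD values (i0 + (x : Int)) 0)

-- A's per-element writer (both inner loops use it)
def writer (values : List Int) (y : Int) (st2 : List (List Int) × Int) (x : Int) : List (List Int) × Int :=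
  (st2.1.modify y.toNat (fun row => row.set x.toNat (PySem.List.pyGetD values st2.2 0)), st2.2 + 1)

theorem rowFwd_succ (values : List Int) (i0 : Int) (k : Nat) :
    rowFwd values i0 (k + 1) = rowFwd values i0 k ++ [PySem.List.pyGetD values (i0 + (k : Int)) 0] := by
  simp [rowFwd, List.range_succ]

theorem rowFwd_cons (values : List Int) (i0 : Int) (k : Nat) :
    rowFwd values i0 (k + 1) = PySem.List.pyGetD values i0 0 :: rowFwd values (i0 + 1) k := by
  apply List.ext_getElem
  · simp [rowFwd]
  · intro j hj hj'
    cases j with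
    | zero => simp [rowFwd]
    | succ j =>
      simp only [List.getElem_cons_succ, rowFwd, List.getElem_map, List.getElem_range]
      congr 1
      push_cast
      ring

theorem length_rowFwd (values : List Int) (i0 : Int) (W : Nat) : (rowFwd values i0 W).length = W := by
  simp [rowFwd]

theorem modify_set_self {α : Type} (m : List α) (i : Nat) (a : α) (f : α → α) (h : i < m.length) :
    (m.set i a).modify i f = m.set i (f a) := by
  apply List.ext_getElem
  · simp
  · intro j hj hj'
    rw [List.getElem_modify]
    by_cases hji : j = i
    · subst hji
      simp
    · rw [if_neg (by omega), List.getElem_set_ne (by omega), List.getElem_set_ne (by omega)]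

theorem drop_set_cons {α : Type} (l : List α) (k : Nat) (v : α) (h : k < l.length) :
    (l.set k v).drop k = v :: l.drop (k + 1) := by
  rw [List.drop_eq_getElem_cons (by simpa using h)]
  congr 1
  · simp
  · exact List.drop_set_of_lt (by omega)

theorem set_drop_zero {α : Type} (l : List α) (k : Nat) (v : α) (h : k < l.length) :
    (l.drop k).set 0 v = v :: l.drop (k + 1) := by
  rw [List.drop_eq_getElem_cons h]
  rfl

-- inner even loop: writes rowFwd into positions 0..k-1 of row y, advancing idx by k
theorem inner_even (values : List Int) (y : Int) (k : Nat) (m : List (List Int)) (i0 : Int)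
    (hy : y.toNat < m.length) (hk : k ≤ m[y.toNat].length) :
    (PySem.List.pyRange 0 (k : Int) 1).foldl (writer values y) (m, i0)
      = (m.set y.toNat (rowFwd values i0 k ++ m[y.toNat].drop k), i0 + (k : Int)) := by
  induction k with
  | zero =>
    rw [PySem.List.pyRange_one_eq_nil (by omega)]
    simp [rowFwd, List.set_getElem_self]
  | succ k ih =>
    have hk' : k ≤ m[y.toNat].length := by omega
    have hsplit : (PySem.List.pyRange 0 ((k : Int) + 1) 1)
        = PySem.List.pyRange 0 (k : Int) 1 ++ [(k : Int)] :=
      PySem.List.pyRange_one_succ_right (by omega)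
    have hcast : ((k + 1 : Nat) : Int) = (k : Int) + 1 := by push_cast; ring
    rw [hcast, hsplit, List.foldl_append, ih hk']
    simp only [List.foldl_cons, List.foldl_nil, writer]
    rw [modify_set_self _ _ _ _ hy, Prod.mk.injEq]
    refine ⟨?_, by omega⟩
    congr 1
    rw [show (k : Int).toNat = k from by omega, List.set_append,
      if_neg (by rw [length_rowFwd]; omega), length_rowFwd, Nat.sub_self]
    rw [set_drop_zero m[y.toNat] k _ (by omega)]
    rw [rowFwd_succ]
    simp

-- inner odd loop: counts x down from k-1 to 0, writing the same values reversed
theorem inner_odd (values : List Int) (y : Int) (k : Nat) (m : List (List Int)) (i0 : Int)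
    (hy : y.toNat < m.length) (hk : k ≤ m[y.toNat].length) :
    (PySem.List.pyRange ((k : Int) - 1) (-1) (-1)).foldl (writer values y) (m, i0)
      = (m.set y.toNat ((rowFwd values i0 k).reverse ++ m[y.toNat].drop k), i0 + (k : Int)) := by
  induction k generalizing m i0 with
  | zero =>
    rw [PySem.List.pyRange_neg_one_eq_nil (by omega)]
    simp [rowFwd, List.set_getElem_self]
  | succ k ih =>
    have hk1 : k < m[y.toNat].length := by omega
    have hcast : ((k + 1 : Nat) : Int) - 1 = (k : Int) := by push_cast; ring
    rw [hcast, PySem.List.pyRange_neg_one_cons (by omega), List.foldl_cons]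
    have hstep : writer values y (m, i0) (k : Int)
        = (m.set y.toNat (m[y.toNat].set k (PySem.List.pyGetD values i0 0)), i0 + 1) := by
      simp only [writer]
      rw [List.modify_eq_set, List.getElem?_eq_getElem hy]
      simp only [Option.getD_some]
      rw [show (k : Int).toNat = k from by omega]
    rw [hstep]
    set v := PySem.List.pyGetD values i0 0 with hv
    set m' := m.set y.toNat (m[y.toNat].set k v) with hm'
    have hy' : y.toNat < m'.length := by simp [hm', hy]
    have hget' : m'[y.toNat] = m[y.toNat].set k v := by
      simp [hm']
    have hk' : k ≤ m'[y.toNat].length := by rw [hget']; simp; omega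
    rw [ih m' (i0 + 1) hy' hk', Prod.mk.injEq]
    refine ⟨?_, by push_cast; ring⟩
    rw [hget', drop_set_cons _ _ _ hk1, hm', List.set_set]
    congr 1
    rw [rowFwd_cons]
    simp [hv]

-- replace A's width-ranges by ranges over width.toNat (equal also for negative width: both empty)
theorem pyRange_width_toNat (width : Int) :
    PySem.List.pyRange 0 width 1 = PySem.List.pyRange 0 ((width.toNat : Nat) : Int) 1 := by
  by_cases h : width ≤ 0
  · rw [PySem.List.pyRange_one_eq_nil h, PySem.List.pyRange_one_eq_nil (by omega)]
  · rw [Int.toNat_of_nonneg (by omega)]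

theorem pyRange_width_toNat_neg (width : Int) :
    PySem.List.pyRange (width - 1) (-1) (-1)
      = PySem.List.pyRange (((width.toNat : Nat) : Int) - 1) (-1) (-1) := by
  by_cases h : width ≤ 0
  · rw [PySem.List.pyRange_neg_one_eq_nil (by omega), PySem.List.pyRange_neg_one_eq_nil (by omega)]
  · rw [Int.toNat_of_nonneg (by omega)]

-- the row the serpentine order puts at height-index y
def rowOf (values : List Int) (W : Nat) (y : Nat) : List Int :=
  if y % 2 = 0 then rowFwd values ((y * W : Nat) : Int) W
  else (rowFwd values ((y * W : Nat) : Int) W).reverse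

-- outer loop invariant: after h rows the first h rows are the serpentine rows and idx = h*W
theorem outer_inv (values : List Int) (width : Int) (W : Nat) (hW : W = width.toNat)
    (h : Nat) (m : List (List Int)) (hlen : h ≤ m.length) (hrow : ∀ r ∈ m, r.length = W) :
    (PySem.List.pyRange 0 (h : Int) 1).foldl
      (fun (st : List (List Int) × Int) y =>
        if PySem.Int.mod y 2 == 0 then
          (PySem.List.pyRange 0 width 1).foldl (writer values y) st
        else
          (PySem.List.pyRange (width - 1) (-1) (-1)).foldl (writer values y) st)
      (m, 0)
    = ((List.range h).map (rowOf values W) ++ m.drop h, ((h * W : Nat) : Int)) := by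
  induction h with
  | zero =>
    rw [PySem.List.pyRange_one_eq_nil (show ((0 : Nat) : Int) ≤ 0 from by simp)]
    simp
  | succ h ih =>
    have hlen' : h ≤ m.length := by omega
    have hcast : ((h + 1 : Nat) : Int) = (h : Int) + 1 := by push_cast; ring
    rw [hcast, PySem.List.pyRange_one_succ_right (show (0 : Int) ≤ (h : Int) from by omega),
      List.foldl_append, ih hlen']
    simp only [List.foldl_cons, List.foldl_nil]
    set M := (List.range h).map (rowOf values W) ++ m.drop h with hM
    have hMlen : M.length = m.length := by
      rw [hM, List.length_append, List.length_map, List.length_range, List.length_drop]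
      omega
    have hyNat : (h : Int).toNat = h := by omega
    have hyM : (h : Int).toNat < M.length := by omega
    have hMh : M[(h : Int).toNat]'(by omega) = m[h]'(by omega) := by
      rw [List.getElem_append_right (by simp [hyNat])]
      simp [hyNat, List.getElem_drop]
    have hmh : (m[h]'(by omega)).length = W := hrow _ (by exact List.getElem_mem _)
    have hWle : W ≤ M[(h : Int).toNat].length := by rw [hMh, hmh]
    have hdropW : M[(h : Int).toNat].drop W = [] := by
      rw [hMh]
      apply List.drop_eq_nil_of_le
      omega
    have hsetM : ∀ r : List Int, r = rowOf values W h →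
        M.set (h : Int).toNat (r ++ M[(h : Int).toNat].drop W)
          = (List.range (h + 1)).map (rowOf values W) ++ m.drop (h + 1) := by
      intro r hr
      rw [hdropW, List.append_nil, hM, hyNat]
      rw [List.set_append, if_neg (by simp), List.length_map, List.length_range, Nat.sub_self]
      rw [set_drop_zero m h r (by omega), List.range_succ]
      simp [hr]
    have hidx : ((h * W : Nat) : Int) + (W : Int) = (((h + 1) * W : Nat) : Int) := by
      push_cast; ring
    by_cases hpar : h % 2 = 0
    · have hcond : (PySem.Int.mod (h : Int) 2 == 0) = true := by
        simp
        omega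
      rw [hcond]
      simp only [if_true]
      rw [pyRange_width_toNat, ← hW, inner_even values (h : Int) W M _ hyM hWle]
      rw [hsetM _ (by simp [rowOf, hpar]), hidx]
    · have hcond : (PySem.Int.mod (h : Int) 2 == 0) = false := by
        simp
        omega
      rw [hcond]
      simp only [Bool.false_eq_true, if_false]
      rw [pyRange_width_toNat_neg, ← hW, inner_odd values (h : Int) W M _ hyM hWle]
      rw [hsetM _ (by simp [rowOf, hpar]), hidx]

-- B's row equals the serpentine row when enough input is present
theorem rowFwd_eq_slice (values : List Int) (j W : Nat) (hjW : j + W ≤ values.length) :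
    rowFwd values ((j : Nat) : Int) W = (values.drop j).take W := by
  apply List.ext_getElem
  · simp [length_rowFwd]
    omega
  · intro x hx hx'
    have hxW : x < W := by simpa [length_rowFwd] using hx
    simp only [rowFwd, List.getElem_map, List.getElem_range]
    rw [PySem.List.pyGetD_eq_getElem values 0 (by omega) (by omega)]
    rw [List.getElem_take, List.getElem_drop]
    congr 1

-- ===== VERDICT (by name: the statement is the Claim_ definition above) =====
theorem unflatten_row_major_spec : Claim_equal_unflatten_row_major := by
  intro values width height _ hpre
  obtain ⟨hw0, hlen⟩ := hpre
  simp only [Spec_unflatten_row_major, unflatten_row_major, unflatten_row_major_alt]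
  by_cases hh : height ≤ 0
  · rw [PySem.List.pyRange_one_eq_nil hh]
    simp
  · set W := width.toNat with hW
    set h := height.toNat with hh'
    have hheight : height = (h : Int) := by omega
    have hwW : width = ((W : Nat) : Int) := by omega
    have hWlen : h * W ≤ values.length := by
      have h1 : ((h * W : Nat) : Int) ≤ (values.length : Int) := by
        push_cast
        rw [show ((h : Int) * (W : Int)) = width * height from by rw [hwW, hheight]; ring]
        exact hlen
      exact_mod_cast h1
    -- initial matrix: h rows, each of length W
    set m0 : List (List Int) :=
      (PySem.List.pyRange 0 height 1).map (fun _ => (PySem.List.pyRange 0 width 1).map (fun _ => (0 : Int))) with hm0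
    have hm0len : m0.length = h := by
      simp [hm0, PySem.List.length_pyRange_one]
      omega
    have hm0row : ∀ r ∈ m0, r.length = W := by
      intro r hr
      rw [hm0] at hr
      obtain ⟨y, -, rfl⟩ := List.mem_map.mp hr
      simp [PySem.List.length_pyRange_one]
      omega
    rw [hheight]
    rw [show (List.foldl
        (fun (st : List (List Int) × Int) (y : Int) =>
          if PySem.Int.mod y 2 == 0 then
            List.foldl
              (fun (st2 : List (List Int) × Int) (x : Int) =>
                (st2.1.modify y.toNat fun row => row.set x.toNat (PySem.List.pyGetD values st2.2 0), st2.2 + 1))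
              st (PySem.List.pyRange 0 width 1)
          else
            List.foldl
              (fun (st2 : List (List Int) × Int) (x : Int) =>
                (st2.1.modify y.toNat fun row => row.set x.toNat (PySem.List.pyGetD values st2.2 0), st2.2 + 1))
              st (PySem.List.pyRange (width - 1) (-1) (-1)))
        (m0, (0 : Int)) (PySem.List.pyRange 0 (h : Int) 1))
      = ((List.range h).map (rowOf values W) ++ m0.drop h, ((h * W : Nat) : Int))
      from outer_inv values width W hW h m0 (by omega) hm0row]
    rw [List.drop_eq_nil_of_le (by omega), List.append_nil]
    -- B side: fold-append is map
    rw [PySem.List.foldl_append_singleton_eq_map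
      (fun y => if PySem.Int.mod y 2 == 1
        then (PySem.List.slice values (some (y * width)) (some ((y + 1) * width))).reverse
        else PySem.List.slice values (some (y * width)) (some ((y + 1) * width)))]
    rw [PySem.List.pyRange_zero, List.map_map, List.nil_append]
    apply List.map_congr_left
    intro k hk
    have hkh : k < h := by simpa using hk
    have hrow : rowFwd values ((k * W : Nat) : Int) W
        = PySem.List.slice values (some ((k : Int) * width)) (some (((k : Int) + 1) * width)) := by
      rw [hwW]
      rw [show (k : Int) * ((W : Nat) : Int) = ((k * W : Nat) : Int) from by push_cast; ring]
      rw [show ((k : Int) + 1) * ((W : Nat) : Int) = ((k * W : Nat) : Int) + ((W : Nat) : Int) from by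
        push_cast; ring]
      rw [PySem.List.slice_natCast_add]
      exact rowFwd_eq_slice values (k * W) W (by nlinarith)
    simp only [Function.comp_apply]
    by_cases hpar : k % 2 = 0
    · have hc1 : (PySem.Int.mod (k : Int) 2 == 1) = false := by
        simp
        omega
      rw [hc1]
      simp only [Bool.false_eq_true, if_false, rowOf, if_pos hpar]
      exact hrow
    · have hc1 : (PySem.Int.mod (k : Int) 2 == 1) = true := by
        simp
        omega
      rw [hc1]
      simp only [if_true, rowOf, if_neg hpar]
      rw [hrow]
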